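-- pv_equiv track=rewrite | github.com/adventcoder/adventofcode-2023 | day11.py | distance_sum_major_old
-- ===== SOURCE A (Python) =====
-- def distance_sum_major_old(rows, factor):
--     ys = []
--     y = 0
--     for row in rows:
--         n = row.count('#')
--         ys.append((y, n))
--         y += factor if n == 0 else 1
--     distance = 0
--     for i, (y1, n1) in enumerate(ys):
--         for (y2, n2) in ys[i+1:]:
--             distance += n1*n2*(y2 - y1)
--     return distance
-- ===== SOURCE B (Python) =====
-- def distance_sum_major_old(rows, factor):
--     # One pass: at each row pair it with all earlier rows via running
--     # prefix sums (cnt = sum of earlier galaxy counts, wsum = sum of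
--     # earlier count*y), instead of the quadratic pairwise double loop.
--     total = 0
--     cnt = 0
--     wsum = 0
--     y = 0
--     for row in rows:
--         n = row.count('#')
--         total += n * (y * cnt - wsum)
--         cnt += n
--         wsum += n * y
--         y += factor if n == 0 else 1
--     return total
-- ===== Notes on version B (the rewrite author's own statement) =====
-- stated objective: faster
-- what changed: Replaced the quadratic pairwise double loop over the weighted row list by a single pass that maintains running prefix sums of galaxy counts and y-weighted counts.
import Mathlib
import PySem

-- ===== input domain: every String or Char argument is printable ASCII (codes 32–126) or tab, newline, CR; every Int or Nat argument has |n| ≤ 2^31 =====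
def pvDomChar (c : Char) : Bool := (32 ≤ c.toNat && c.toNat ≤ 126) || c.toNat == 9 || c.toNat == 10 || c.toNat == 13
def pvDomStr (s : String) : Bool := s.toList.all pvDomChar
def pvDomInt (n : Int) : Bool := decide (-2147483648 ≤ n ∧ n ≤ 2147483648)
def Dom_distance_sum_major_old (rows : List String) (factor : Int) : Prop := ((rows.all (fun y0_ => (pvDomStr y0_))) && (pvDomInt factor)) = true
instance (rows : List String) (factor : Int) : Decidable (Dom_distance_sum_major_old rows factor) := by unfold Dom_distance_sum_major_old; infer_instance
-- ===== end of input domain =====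

-- B replaces A's O(R^2) pairwise double loop by one pass with running prefix sums (objective: faster, asymptotic).

-- ===== PORT A =====
-- first loop: builds ys = [(y, n)] and advances y; second loops: pairwise sum over enumerate(ys) and ys[i+1:]
def distance_sum_major_old (rows : List String) (factor : Int) : Int :=
  let st := rows.foldl (fun (st : List (Int × Int) × Int) row =>
      let n : Int := (PySem.Str.count row "#" : Int)
      (st.1 ++ [(st.2, n)], st.2 + (if n == 0 then factor else 1))) ([], 0)
  let ys := st.1
  (PySem.List.enumerate ys 0).foldl (fun dist ip =>
      (PySem.List.slice ys (some (ip.1 + 1)) none).foldl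
        (fun d q => d + ip.2.2 * q.2 * (q.1 - ip.2.1)) dist) 0

-- ===== PORT B =====
-- single pass: state (total, cnt, wsum, y); at each row adds n*(y*cnt - wsum) for all earlier rows
def distance_sum_major_old_alt (rows : List String) (factor : Int) : Int :=
  (rows.foldl (fun (st : Int × Int × Int × Int) row =>
      match st with
      | (total, cnt, wsum, y) =>
        let n : Int := (PySem.Str.count row "#" : Int)
        (total + n * (y * cnt - wsum), cnt + n, wsum + n * y,
         y + (if n == 0 then factor else 1))) ((0 : Int), (0 : Int), (0 : Int), (0 : Int))).1

-- ===== PRECONDITION & SPEC =====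
def Spec_distance_sum_major_old (rows : List String) (factor : Int) (out : Int) : Prop := out = distance_sum_major_old_alt rows factor
instance (rows : List String) (factor : Int) (out : Int) : Decidable (Spec_distance_sum_major_old rows factor out) := by unfold Spec_distance_sum_major_old; infer_instance

-- ===== CLAIM (what is proved, stated in full; the proofs are below) =====
def Claim_equal_distance_sum_major_old : Prop := ∀ (rows : List String) (factor : Int), Dom_distance_sum_major_old rows factor → Spec_distance_sum_major_old rows factor (distance_sum_major_old rows factor)

-- ===== LEMMAS AND PROOFS =====

-- spec of A's first loop as structural recursion
def ysSpec (factor : Int) : List String → Int → List (Int × Int)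
  | [], _ => []
  | r :: rs, y =>
    let n : Int := (PySem.Str.count r "#" : Int)
    (y, n) :: ysSpec factor rs (y + if n == 0 then factor else 1)

def S0 : List (Int × Int) → Int
  | [] => 0
  | p :: l => p.2 + S0 l

def S1 : List (Int × Int) → Int
  | [] => 0
  | p :: l => p.2 * p.1 + S1 l

def rowSum (p : Int × Int) : List (Int × Int) → Int
  | [] => 0
  | q :: l => p.2 * q.2 * (q.1 - p.1) + rowSum p l

def pairSum : List (Int × Int) → Int
  | [] => 0
  | p :: l => rowSum p l + pairSum l

theorem build_eq (factor : Int) : ∀ (rows : List String) (acc : List (Int × Int)) (y : Int),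
    (rows.foldl (fun (st : List (Int × Int) × Int) row =>
      let n : Int := (PySem.Str.count row "#" : Int)
      (st.1 ++ [(st.2, n)], st.2 + (if n == 0 then factor else 1))) (acc, y)).1
    = acc ++ ysSpec factor rows y := by
  intro rows
  induction rows with
  | nil => intro acc y; simp [ysSpec]
  | cons r rs ih =>
    intro acc y
    simp only [List.foldl_cons, ysSpec]
    rw [ih]
    simp

theorem rowSum_eq (p : Int × Int) (l : List (Int × Int)) :
    rowSum p l = p.2 * S1 l - p.2 * p.1 * S0 l := by
  induction l with
  | nil => simp [rowSum, S0, S1]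
  | cons q l ih => simp only [rowSum, S0, S1, ih]; ring

theorem inner_foldl (p : Int × Int) : ∀ (l : List (Int × Int)) (d : Int),
    l.foldl (fun d q => d + p.2 * q.2 * (q.1 - p.1)) d = d + rowSum p l := by
  intro l
  induction l with
  | nil => intro d; simp [rowSum]
  | cons q l ih => intro d; simp only [List.foldl_cons, rowSum, ih]; ring

theorem outer_foldl (ys : List (Int × Int)) : ∀ (suf pref : List (Int × Int)) (d : Int),
    ys = pref ++ suf →
    (PySem.List.enumerate suf (pref.length : Int)).foldl (fun dist ip =>
      (PySem.List.slice ys (some (ip.1 + 1)) none).foldl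
        (fun d q => d + ip.2.2 * q.2 * (q.1 - ip.2.1)) dist) d
    = d + pairSum suf := by
  intro suf
  induction suf with
  | nil => intro pref d h; simp [PySem.List.enumerate, pairSum]
  | cons p suf ih =>
    intro pref d h
    rw [PySem.List.enumerate_cons, List.foldl_cons]
    have hcast : ((pref.length : Int) + 1) = ((pref.length + 1 : Nat) : Int) := by push_cast; ring
    have hdrop : ys.drop (pref.length + 1) = suf := by
      have : ys = (pref ++ [p]) ++ suf := by simp [h]
      rw [this, show pref.length + 1 = (pref ++ [p]).length by simp, List.drop_left]
    rw [hcast, PySem.List.slice_from_natCast, hdrop, inner_foldl]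
    have h2 : ys = (pref ++ [p]) ++ suf := by simp [h]
    have hlen : (((pref ++ [p]).length : Nat) : Int) = ((pref.length + 1 : Nat) : Int) := by simp
    rw [← hlen, ih (pref ++ [p]) _ h2]
    simp only [pairSum]
    ring

theorem b_fold (factor : Int) : ∀ (rows : List String) (t c w y : Int),
    (rows.foldl (fun (st : Int × Int × Int × Int) row =>
      match st with
      | (total, cnt, wsum, y) =>
        let n : Int := (PySem.Str.count row "#" : Int)
        (total + n * (y * cnt - wsum), cnt + n, wsum + n * y,
         y + (if n == 0 then factor else 1))) (t, c, w, y)).1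
    = t + c * S1 (ysSpec factor rows y) - w * S0 (ysSpec factor rows y) + pairSum (ysSpec factor rows y) := by
  intro rows
  induction rows with
  | nil => intro t c w y; simp [ysSpec, S0, S1, pairSum]
  | cons r rs ih =>
    intro t c w y
    simp only [List.foldl_cons, ysSpec]
    rw [ih]
    simp only [pairSum, S0, S1, rowSum_eq]
    ring

-- ===== VERDICT (by name: the statement is the Claim_ definition above) =====
theorem distance_sum_major_old_spec : Claim_equal_distance_sum_major_old := by
  intro rows factor _
  unfold Spec_distance_sum_major_old distance_sum_major_old distance_sum_major_old_alt
  rw [b_fold factor rows 0 0 0 0]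
  simp only []
  rw [build_eq factor rows [] 0]
  simp only [List.nil_append]
  have := outer_foldl (ysSpec factor rows 0) (ysSpec factor rows 0) [] 0 rfl
  simp only [List.length_nil, Int.natCast_zero] at this
  rw [this]
  ring
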